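-- pv_equiv track=rewrite | github.com/Joaoguzman/PROYECTO_ABACO_DIGITAL | funciones/funciones.py | descompone_numero
-- ===== SOURCE A (Python) =====
-- def descompone_numero(numero_original):
--     lista_digitos = [0, 0, 0, 0, 0, 0]
--     numero_original = str(numero_original)
--     for digito in numero_original:
--         lista_digitos.append(int(digito))
--         while len(lista_digitos) != 6:
--             lista_digitos.pop(0)
--     return lista_digitos
-- ===== SOURCE B (Python) =====
-- def descompone_numero(numero_original):
--     digits = [int(c) for c in str(numero_original)]
--     return ([0, 0, 0, 0, 0, 0] + digits)[-6:]
-- ===== Notes on version B (the rewrite author's own statement) =====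
-- stated objective: simpler
-- what changed: A maintains a 6-element sliding window, appending each digit and popping from the front in an inner while loop; B materializes the whole digit list once and takes a single [-6:] tail slice of the zero-padded list.
import Mathlib
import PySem

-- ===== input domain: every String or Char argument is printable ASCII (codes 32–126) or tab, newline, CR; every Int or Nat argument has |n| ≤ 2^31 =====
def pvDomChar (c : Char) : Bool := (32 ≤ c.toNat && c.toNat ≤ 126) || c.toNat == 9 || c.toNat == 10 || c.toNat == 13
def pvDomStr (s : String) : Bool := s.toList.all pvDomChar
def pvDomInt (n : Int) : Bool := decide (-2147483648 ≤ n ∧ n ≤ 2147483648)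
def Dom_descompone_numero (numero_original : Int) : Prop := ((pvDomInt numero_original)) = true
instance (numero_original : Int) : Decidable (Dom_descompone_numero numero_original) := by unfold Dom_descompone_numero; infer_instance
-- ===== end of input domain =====

-- B replaces A's incremental 6-element sliding window (append + inner while/pop(0)) by
-- building the full digit list once and taking one [-6:] tail slice of the padded list.

-- ===== PORT A =====

-- int(c) for a single character; exact where Python's int(c) returns a value
-- (inside Pre_ every character of str(numero_original) is a decimal digit).
def pyIntChar (c : Char) : Int := (PySem.Int.ofChars? [c]).getD 0

-- the inner 'while len(lista_digitos) != 6: lista_digitos.pop(0)' loop;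
-- the [] case is Python's IndexError, unreachable since the list always has ≥ 6 elements.
def popLoop : List Int → List Int
  | [] => []
  | x :: t => if (x :: t).length ≠ 6 then popLoop t else x :: t

def descompone_numero (numero_original : Int) : List Int :=
  (PySem.Int.toChars numero_original).foldl
    (fun st c => popLoop (st ++ [pyIntChar c])) [0, 0, 0, 0, 0, 0]

-- ===== PORT B =====
def descompone_numero_alt (numero_original : Int) : List Int :=
  let digits := (PySem.Int.toChars numero_original).map pyIntChar
  PySem.List.slice ([0, 0, 0, 0, 0, 0] ++ digits) (some (-6)) none

-- ===== PRECONDITION & SPEC =====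
-- Pre_ excludes negative inputs: there str(numero_original) starts with '-' and
-- Python's int('-') raises ValueError in both A and B.
def Pre_descompone_numero (numero_original : Int) : Prop := 0 ≤ numero_original
instance (numero_original : Int) : Decidable (Pre_descompone_numero numero_original) := by unfold Pre_descompone_numero; infer_instance
def pvWitness_descompone_numero : Int := (1234567)

def Spec_descompone_numero (numero_original : Int) (out : List Int) : Prop := out = descompone_numero_alt numero_original
instance (numero_original : Int) (out : List Int) : Decidable (Spec_descompone_numero numero_original out) := by unfold Spec_descompone_numero; infer_instance

-- ===== CLAIM (what is proved, stated in full; the proofs are below) =====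
def Claim_equal_descompone_numero : Prop := ∀ (numero_original : Int), Dom_descompone_numero numero_original → Pre_descompone_numero numero_original → Spec_descompone_numero numero_original (descompone_numero numero_original)

-- ===== LEMMAS AND PROOFS =====

lemma popLoop_six (t : List Int) (h : t.length = 6) : popLoop t = t := by
  cases t with
  | nil => simp at h
  | cons y u => simp [popLoop, h]

lemma popLoop_seven (x : Int) (t : List Int) (h : t.length = 6) : popLoop (x :: t) = t := by
  simp [popLoop, h, popLoop_six t h]

lemma foldl_window (cs : List Char) : ∀ (st : List Int), st.length = 6 →
    cs.foldl (fun st c => popLoop (st ++ [pyIntChar c])) st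
      = (st ++ cs.map pyIntChar).drop cs.length := by
  induction cs with
  | nil => intro st h; simp
  | cons c cs ih =>
      intro st h
      cases st with
      | nil => simp at h
      | cons s0 rest =>
          have hr : rest.length = 5 := by simpa using h
          have h7 : (rest ++ [pyIntChar c]).length = 6 := by simp [hr]
          have hstep : popLoop ((s0 :: rest) ++ [pyIntChar c]) = rest ++ [pyIntChar c] := by
            simpa using popLoop_seven s0 (rest ++ [pyIntChar c]) h7
          simp only [List.foldl_cons, hstep, ih _ h7, List.map_cons, List.length_cons]
          simp [List.append_assoc, List.drop_succ_cons]

theorem descompone_numero_eq (n : Int) :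
    descompone_numero n = descompone_numero_alt n := by
  unfold descompone_numero descompone_numero_alt
  rw [PySem.List.slice_from_neg_ofNat _ 6 (by omega),
      foldl_window _ _ (by simp)]
  simp

-- ===== VERDICT (by name: the statement is the Claim_ definition above) =====
theorem descompone_numero_spec : Claim_equal_descompone_numero := by
  intro n _ _
  exact descompone_numero_eq n
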